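-- pv_equiv track=rewrite | github.com/KimGeunUk/Algorithm-Study | Programmers/Level1/신고 결과 받기.py | solution
-- ===== SOURCE A (Python) =====
-- from collections import defaultdict
--
-- def solution(id_list, report, k):
--     answer = [0] * len(id_list)
--
--     d1 = defaultdict(list)
--     d2 = defaultdict(int)
--
--     report = list(set(report)) # 중복 제거
--     for r in report:
--         a, b = r.split(' ')
--         d1[a].append(b)
--         d2[b] += 1
--
--     for idx, id in enumerate(id_list):
--         for id_ in d1[id]:
--             if d2[id_] >= k:
--                 answer[idx] += 1
--
--     return answer
-- ===== SOURCE B (Python) =====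
-- def solution(id_list, report, k):
--     deduped = set(report)
--     counts = {}
--     for r in deduped:
--         _, b = r.split(' ')
--         counts[b] = counts.get(b, 0) + 1
--     banned = {u for u, c in counts.items() if c >= k}
--     result = {}
--     for r in deduped:
--         a, b = r.split(' ')
--         if b in banned:
--             result[a] = result.get(a, 0) + 1
--     return [result.get(i, 0) for i in id_list]
-- ===== Notes on version B (the rewrite author's own statement) =====
-- stated objective: alternative
-- what changed: B drops A's reporter-to-list-of-reported index and the nested id_list x reported-list loop; instead it builds a reported-to-count dict over the deduped reports, derives the banned set once, counts banned reports per reporter in one flat pass, and maps id_list through a final dict lookup.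
import Mathlib
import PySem

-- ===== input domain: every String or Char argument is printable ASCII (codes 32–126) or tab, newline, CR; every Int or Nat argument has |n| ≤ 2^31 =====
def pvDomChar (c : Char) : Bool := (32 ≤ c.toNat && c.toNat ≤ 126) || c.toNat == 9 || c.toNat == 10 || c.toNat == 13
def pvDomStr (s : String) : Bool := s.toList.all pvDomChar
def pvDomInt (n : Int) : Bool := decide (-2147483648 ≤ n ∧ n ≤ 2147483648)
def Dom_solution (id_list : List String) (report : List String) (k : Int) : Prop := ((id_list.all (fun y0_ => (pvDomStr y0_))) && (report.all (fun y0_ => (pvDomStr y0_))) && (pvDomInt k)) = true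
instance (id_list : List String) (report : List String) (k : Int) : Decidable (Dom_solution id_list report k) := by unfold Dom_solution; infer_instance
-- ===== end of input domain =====

-- B replaces A's reporter→list-of-reported index and the nested id_list loop by a
-- reported→count dict, a banned set, one flat counting pass over the deduped reports and a
-- final dict-lookup map (alternative decomposition; no speed claim).
-- NOTE on set order: A iterates list(set(report)); the result depends only on counts, not on
-- that iteration order, so both ports iterate the first-occurrence dedup PySem.Set.ofList.

-- shared transliteration of «r.split(' ')» and of the unpacking «a, b = …»
def pvParts (r : String) : List String := (PySem.Str.split? r " ").getD []
def pvFst (r : String) : String := (pvParts r).headD ""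
def pvSnd (r : String) : String := (pvParts r).tail.headD ""

-- ===== PORT A =====
-- d1[a].append(b); d2[b] += 1  (the «length == 2» guard is Python's unpacking «a, b = …»,
-- which raises on any other length: those inputs are excluded by Pre_)
def pvStepTally (p : PySem.Dict String (List String) × PySem.Dict String Int) (r : String) :
    PySem.Dict String (List String) × PySem.Dict String Int :=
  if (pvParts r).length == 2 then
    (p.1.modify (pvFst r) [] (· ++ [pvSnd r]), p.2.modify (pvSnd r) 0 (· + 1))
  else p

-- «for id_ in d1[id]: if d2[id_] >= k: answer[idx] += 1»
def pvInner (d2 : PySem.Dict String Int) (k : Int) (ans : List Int) (idx : Int)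
    (xs : List String) : List Int :=
  xs.foldl (fun a x =>
    if d2.getD x 0 ≥ k then PySem.List.pySetD a idx (PySem.List.pyGetD a idx 0 + 1) else a) ans

def solution (id_list : List String) (report : List String) (k : Int) : List Int :=
  let answer : List Int := List.replicate id_list.length 0
  let rep : List String := PySem.Set.ofList report
  let dd := rep.foldl pvStepTally (PySem.Dict.empty, PySem.Dict.empty)
  (PySem.List.enumerate id_list 0).foldl
    (fun ans p => pvInner dd.2 k ans p.1 (dd.1.getD p.2 [])) answer

-- ===== PORT B =====
-- counts[b] = counts.get(b, 0) + 1
def pvStepCount (c : PySem.Dict String Int) (r : String) : PySem.Dict String Int :=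
  if (pvParts r).length == 2 then c.insert (pvSnd r) (c.getD (pvSnd r) 0 + 1) else c

-- if b in banned: result[a] = result.get(a, 0) + 1
def pvStepBan (banned : PySem.Set String) (res : PySem.Dict String Int) (r : String) :
    PySem.Dict String Int :=
  if (pvParts r).length == 2 then
    (if PySem.Set.contains banned (pvSnd r) then
      res.insert (pvFst r) (res.getD (pvFst r) 0 + 1)
    else res)
  else res

def solution_alt (id_list : List String) (report : List String) (k : Int) : List Int :=
  let deduped : List String := PySem.Set.ofList report
  let counts := deduped.foldl pvStepCount PySem.Dict.empty
  let banned : PySem.Set String :=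
    PySem.Set.ofList ((counts.items.filter (fun p => p.2 ≥ k)).map Prod.fst)
  let result := deduped.foldl (pvStepBan banned) PySem.Dict.empty
  id_list.map (fun i => result.getD i 0)

-- ===== PRECONDITION & SPEC =====
-- Pre_ excludes exactly the report strings that do not split on ' ' into two parts:
-- there «a, b = r.split(' ')» raises ValueError (in A and in B alike).
def Pre_solution (id_list : List String) (report : List String) (k : Int) : Prop :=
  ∀ r ∈ report, ((PySem.Str.split? r " ").getD []).length = 2
instance (id_list : List String) (report : List String) (k : Int) : Decidable (Pre_solution id_list report k) := by unfold Pre_solution; infer_instance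

def pvWitness_solution : List String × List String × Int :=
  (["muzi", "frodo", "apeach"], ["muzi frodo", "apeach frodo", "muzi frodo"], 2)

def Spec_solution (id_list : List String) (report : List String) (k : Int) (out : List Int) : Prop := out = solution_alt id_list report k
instance (id_list : List String) (report : List String) (k : Int) (out : List Int) : Decidable (Spec_solution id_list report k out) := by unfold Spec_solution; infer_instance

-- ===== CLAIM (what is proved, stated in full; the proofs are below) =====
def Claim_equal_solution : Prop := ∀ (id_list : List String) (report : List String) (k : Int), Dom_solution id_list report k → Pre_solution id_list report k → Spec_solution id_list report k (solution id_list report k)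

-- ===== LEMMAS AND PROOFS =====

-- the (reporter, reported) pair carried by a well-formed report line
def pvPair (r : String) : String × String := (pvFst r, pvSnd r)

-- under Pre_, the «length == 2» guards inside the folds are always taken
theorem pvGuard_true {r : String} (h : ((PySem.Str.split? r " ").getD []).length = 2) :
    ((pvParts r).length == 2) = true := by
  simp [pvParts, h]

-- A's combined (d1, d2) fold splits into two independent folds
theorem pvTally_split (L : List String) :
    ∀ (d1 : PySem.Dict String (List String)) (d2 : PySem.Dict String Int),
      L.foldl pvStepTally (d1, d2)
        = (L.foldl (fun d r => if (pvParts r).length == 2 then d.modify (pvFst r) [] (· ++ [pvSnd r]) else d) d1,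
           L.foldl (fun d r => if (pvParts r).length == 2 then d.modify (pvSnd r) 0 (· + 1) else d) d2) := by
  induction L with
  | nil => intro d1 d2; rfl
  | cons r L ih =>
    intro d1 d2
    simp only [List.foldl_cons, pvStepTally]
    by_cases h : ((pvParts r).length == 2) = true
    · simp only [h, if_true]; exact ih _ _
    · simp only [eq_false_of_ne_true h, Bool.false_eq_true, if_false]; exact ih _ _

-- value of d1 at a key: the reported ids of the deduped reports filed by this reporter
theorem pvD1_getD (L : List String) (h : ∀ r ∈ L, ((PySem.Str.split? r " ").getD []).length = 2)
    (id : String) :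
    (L.foldl (fun d r => if (pvParts r).length == 2 then d.modify (pvFst r) [] (· ++ [pvSnd r]) else d)
        (PySem.Dict.empty)).getD id []
      = ((L.map pvPair).filter (fun p => p.1 == id)).map (·.2) := by
  rw [PySem.List.foldl_congr_mem _ _ (fun d r => d.modify (pvFst r) [] (· ++ [pvSnd r])) _
      (fun d r hr => by rw [pvGuard_true (h r hr), if_pos rfl])]
  have : L.foldl (fun d r => d.modify (pvFst r) [] (· ++ [pvSnd r])) (PySem.Dict.empty)
      = (L.map pvPair).foldl (fun d p => d.modify p.1 [] (· ++ [p.2])) (PySem.Dict.empty) := by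
    rw [List.foldl_map]; rfl
  rw [this, PySem.Dict.getD_foldl_modify_append]
  simp [PySem.Dict.getD_empty]

-- d2 is the multiplicity table of the reported ids
theorem pvD2_eq (L : List String) (h : ∀ r ∈ L, ((PySem.Str.split? r " ").getD []).length = 2) :
    L.foldl (fun d r => if (pvParts r).length == 2 then d.modify (pvSnd r) 0 (· + 1) else d)
        (PySem.Dict.empty)
      = PySem.Dict.counter (L.map pvSnd) := by
  rw [PySem.List.foldl_congr_mem _ _ (fun d r => d.modify (pvSnd r) 0 (· + 1)) _
      (fun d r hr => by rw [pvGuard_true (h r hr), if_pos rfl])]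
  rw [PySem.Dict.counter_eq_foldl, List.foldl_map]

-- B's counts dict is the same multiplicity table
theorem pvCounts_eq (L : List String) (h : ∀ r ∈ L, ((PySem.Str.split? r " ").getD []).length = 2) :
    L.foldl pvStepCount PySem.Dict.empty = PySem.Dict.counter (L.map pvSnd) := by
  rw [PySem.List.foldl_congr_mem _ _ (fun c r => c.insert (pvSnd r) (c.getD (pvSnd r) 0 + 1)) _
      (fun c r hr => by rw [pvStepCount, pvGuard_true (h r hr), if_pos rfl])]
  rw [← PySem.Dict.foldl_insert_getD_add_one_eq_counter, List.foldl_map]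

-- membership in B's banned set, for an id that is actually reported
theorem pvBanned_contains (bs : List String) (k : Int) {b : String} (hb : b ∈ bs) :
    PySem.Set.contains
        (PySem.Set.ofList (((PySem.Dict.counter (κ := String) bs).items.filter (fun p => p.2 ≥ k)).map Prod.fst)) b
      = decide ((bs.count b : Int) ≥ k) := by
  have hmem : b ∈ ((PySem.Dict.counter (κ := String) bs).items.filter (fun p => p.2 ≥ k)).map Prod.fst
      ↔ (bs.count b : Int) ≥ k := by
    rw [PySem.Dict.items_counter]
    constructor
    · rintro hm
      simp only [List.mem_map, List.mem_filter] at hm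
      obtain ⟨p, ⟨hp, hk⟩, rfl⟩ := hm
      obtain ⟨x, _, rfl⟩ := hp
      simpa using hk
    · intro hk
      refine List.mem_map.2 ⟨(b, (bs.count b : Int)), List.mem_filter.2 ⟨?_, by simpa using hk⟩, rfl⟩
      exact List.mem_map.2 ⟨b, (PySem.Set.mem_ofList bs b).2 hb, rfl⟩
  by_cases hk : (bs.count b : Int) ≥ k
  · have : b ∈ PySem.Set.ofList (((PySem.Dict.counter (κ := String) bs).items.filter (fun p => p.2 ≥ k)).map Prod.fst) :=
      (PySem.Set.mem_ofList _ _).2 (hmem.2 hk)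
    simp [PySem.Set.contains, this, hk]
  · have : b ∉ PySem.Set.ofList (((PySem.Dict.counter (κ := String) bs).items.filter (fun p => p.2 ≥ k)).map Prod.fst) := by
      intro hc; exact hk (hmem.1 ((PySem.Set.mem_ofList _ _).1 hc))
    simp [PySem.Set.contains, this, hk]

-- B's result fold counts, per reporter, the deduped reports with a banned target
theorem pvResult_aux (banned : PySem.Set String) (id : String) :
    ∀ (L : List String), (∀ r ∈ L, ((PySem.Str.split? r " ").getD []).length = 2) →
      ∀ (res : PySem.Dict String Int),
      (L.foldl (pvStepBan banned) res).getD id 0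
        = res.getD id 0 + ((((L.map pvPair).filter (fun p => PySem.Set.contains banned p.2)).map Prod.fst).count id : Int) := by
  intro L
  induction L with
  | nil => intro _ res; simp
  | cons r L ih =>
    intro h res
    have hg := pvGuard_true (h r (List.mem_cons_self))
    have hL := fun r hr => h r (List.mem_cons_of_mem _ hr)
    have hstep : pvStepBan banned res r
        = if PySem.Set.contains banned (pvSnd r) = true then
            res.insert (pvFst r) (res.getD (pvFst r) 0 + 1) else res := by
      unfold pvStepBan
      rw [if_pos hg]
    simp only [List.foldl_cons, hstep]
    by_cases hb : PySem.Set.contains banned (pvSnd r) = true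
    · rw [if_pos hb, ih hL]
      have hfilter : ((pvPair r :: L.map pvPair).filter (fun p => PySem.Set.contains banned p.2))
          = pvPair r :: ((L.map pvPair).filter (fun p => PySem.Set.contains banned p.2)) := by
        rw [List.filter_cons, if_pos (show (banned.contains (pvPair r).2) = true from hb)]
      simp only [List.map_cons, hfilter]
      by_cases hid : pvFst r = id
      · subst hid
        rw [PySem.Dict.getD_insert, if_pos rfl]
        show _ = _ + ((List.count (pvFst r) (pvFst r :: _) : Nat) : Int)
        rw [List.count_cons_self]
        push_cast
        ring
      · rw [PySem.Dict.getD_insert, if_neg (fun hc => hid hc.symm)]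
        show _ = _ + ((List.count id (pvFst r :: _) : Nat) : Int)
        rw [List.count_cons_of_ne (show pvFst r ≠ id from hid)]
    · rw [if_neg hb, ih hL]
      have hfilter : ((pvPair r :: L.map pvPair).filter (fun p => PySem.Set.contains banned p.2))
          = ((L.map pvPair).filter (fun p => PySem.Set.contains banned p.2)) := by
        rw [List.filter_cons, if_neg (show ¬(banned.contains (pvPair r).2) = true from hb)]
      simp only [List.map_cons, hfilter]

theorem pvResult_getD (L : List String) (h : ∀ r ∈ L, ((PySem.Str.split? r " ").getD []).length = 2)
    (banned : PySem.Set String) (id : String) :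
    (L.foldl (pvStepBan banned) PySem.Dict.empty).getD id 0
      = ((((L.map pvPair).filter (fun p => PySem.Set.contains banned p.2)).map Prod.fst).count id : Int) := by
  rw [pvResult_aux banned id L h PySem.Dict.empty]
  simp

-- A's inner loop adds the number of banned reported ids to one cell
theorem pvInner_set (d2 : PySem.Dict String Int) (k : Int) (xs : List String) :
    ∀ (ans : List Int) (n : Nat), n < ans.length →
      pvInner d2 k ans (n : Int) xs
        = ans.set n (ans.getD n 0 + (xs.countP (fun x => decide (d2.getD x 0 ≥ k)) : Int)) := by
  induction xs with
  | nil =>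
    intro ans n hn
    simp only [pvInner, List.foldl_nil, List.countP_nil, Nat.cast_zero, add_zero]
    rw [List.getD_eq_getElem?_getD, List.getElem?_eq_getElem hn]
    simp [List.set_getElem_self]
  | cons x xs ih =>
    intro ans n hn
    simp only [pvInner, List.foldl_cons]
    by_cases hx : d2.getD x 0 ≥ k
    · rw [if_pos hx]
      have hset : PySem.List.pySetD ans (n : Int) (PySem.List.pyGetD ans (n : Int) 0 + 1)
          = ans.set n (ans.getD n 0 + 1) := by
        rw [PySem.List.pySetD_natCast, PySem.List.pyGetD_natCast]
      rw [hset]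
      have hlen : n < (ans.set n (ans.getD n 0 + 1)).length := by simpa using hn
      have hih := ih (ans.set n (ans.getD n 0 + 1)) n hlen
      unfold pvInner at hih
      rw [hih]
      rw [List.set_set]
      have hget : (ans.set n (ans.getD n 0 + 1)).getD n 0 = ans.getD n 0 + 1 := by
        rw [List.getD_eq_getElem?_getD, List.getElem?_eq_getElem hlen, List.getElem_set_self hlen]
        rfl
      rw [hget, List.countP_cons_of_pos (by simpa using hx)]
      congr 1
      push_cast
      ring
    · rw [if_neg hx]
      have hih := ih ans n hn
      unfold pvInner at hih
      rw [hih, List.countP_cons_of_neg (by simpa using hx)]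

-- A's enumerate loop writes each cell once, turning the fold into a map
theorem pvOuter (d1 : PySem.Dict String (List String)) (d2 : PySem.Dict String Int) (k : Int) :
    ∀ (ids : List String) (pre : List Int),
      (PySem.List.enumerate ids (pre.length : Int)).foldl
          (fun ans p => pvInner d2 k ans p.1 (d1.getD p.2 [])) (pre ++ List.replicate ids.length 0)
        = pre ++ ids.map (fun id =>
            ((d1.getD id []).countP (fun x => decide (d2.getD x 0 ≥ k)) : Int)) := by
  intro ids
  induction ids with
  | nil => intro pre; simp [PySem.List.enumerate_nil]
  | cons id ids ih =>
    intro pre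
    rw [PySem.List.enumerate_cons, List.foldl_cons]
    have hlen : pre.length < (pre ++ List.replicate (id :: ids).length 0).length := by
      simp
    rw [pvInner_set d2 k (d1.getD id []) _ pre.length hlen]
    have hget : (pre ++ List.replicate (id :: ids).length 0).getD pre.length 0 = 0 := by
      rw [List.getD_eq_getElem?_getD, List.getElem?_eq_getElem hlen,
        List.getElem_append_right (le_refl pre.length)]
      simp [List.length_cons, List.replicate_succ]
    rw [hget]
    set c : Int := ((d1.getD id []).countP (fun x => decide (d2.getD x 0 ≥ k)) : Int) with hc
    have hset : (pre ++ List.replicate (id :: ids).length 0).set pre.length (0 + c)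
        = (pre ++ [0 + c]) ++ List.replicate ids.length 0 := by
      simp [List.length_cons, List.replicate_succ]
    rw [hset]
    have hstart : (pre.length : Int) + 1 = ((pre ++ [0 + c]).length : Int) := by
      simp
    rw [hstart]
    rw [ih (pre ++ [0 + c])]
    simp [hc]

-- the two programs agree input by input
theorem pvMain (id_list report : List String) (k : Int)
    (hpre : ∀ r ∈ report, ((PySem.Str.split? r " ").getD []).length = 2) :
    solution id_list report k = solution_alt id_list report k := by
  show _ = _
  simp only [solution, solution_alt]
  have hLpre : ∀ r ∈ PySem.Set.ofList report, ((PySem.Str.split? r " ").getD []).length = 2 :=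
    fun r hr => hpre r ((PySem.Set.mem_ofList report r).1 hr)
  rw [pvTally_split]
  rw [pvCounts_eq _ hLpre, pvD2_eq _ hLpre]
  have houter := pvOuter
    ((PySem.Set.ofList report).foldl
      (fun d r => if (pvParts r).length == 2 then d.modify (pvFst r) [] (· ++ [pvSnd r]) else d)
      PySem.Dict.empty)
    (PySem.Dict.counter ((PySem.Set.ofList report).map pvSnd)) k id_list []
  simp only [List.nil_append, List.length_nil, Nat.cast_zero] at houter
  rw [houter]
  apply List.map_congr_left
  intro id _
  rw [pvD1_getD _ hLpre, pvResult_getD _ hLpre]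
  conv_lhs => rw [List.countP_map, List.countP_filter]
  rw [show ∀ (l : List String), List.count id l = List.countP (· == id) l from fun l => rfl]
  conv_rhs => rw [List.countP_map, List.countP_filter]
  refine congrArg (Nat.cast : Nat → Int) ?_
  refine List.countP_congr ?_
  intro p hp
  have hb : p.2 ∈ (PySem.Set.ofList report).map pvSnd := by
    rcases List.mem_map.1 hp with ⟨r, hr, rfl⟩
    exact List.mem_map.2 ⟨r, hr, rfl⟩
  rw [pvBanned_contains _ k hb]
  simp only [Function.comp, PySem.Dict.getD_counter]
  constructor
  · intro h1
    simp only [Bool.and_eq_true, decide_eq_true_eq] at h1 ⊢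
    exact ⟨h1.2, h1.1⟩
  · intro h1
    simp only [Bool.and_eq_true, decide_eq_true_eq] at h1 ⊢
    exact ⟨h1.2, h1.1⟩

-- ===== VERDICT (by name: the statement is the Claim_ definition above) =====
theorem solution_spec : Claim_equal_solution := by
  intro id_list report k _hdom hpre
  show solution id_list report k = solution_alt id_list report k
  exact pvMain id_list report k hpre
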